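-- pv_equiv track=rewrite | github.com/PM25/Medical-Question-Answering-and-Decision-Making-AIdea-Competition | dataset.py | forward_sample
-- ===== SOURCE A (Python) =====
-- def forward_sample(data, idx, thr):
--     count = 0
--     samples = []
--     for i in range(idx + 1, len(data)):
--         count += len(data[i][1])
--         if count <= thr:
--             samples.append(data[i])
--         else:
--             break
--     return samples
-- ===== SOURCE B (Python) =====
-- def forward_sample(data, idx, thr):
--     # Prefix sums over the tail slice, then binary search for the cutoff.
--     # Note: for idx+1 < 0 the slice semantics differ from A's wrap-around
--     # range loop (see D_/Raises_ in the Lean file).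
--     tail = data[idx + 1:]
--     prefix = [0] * len(tail)
--     run = 0
--     for j, item in enumerate(tail):
--         run += len(item[1])
--         prefix[j] = run
--     lo, hi = 0, len(tail)
--     while lo < hi:
--         mid = (lo + hi) // 2
--         if prefix[mid] <= thr:
--             lo = mid + 1
--         else:
--             hi = mid
--     return tail[:lo]
-- ===== Notes on version B (the rewrite author's own statement) =====
-- stated objective: alternative
-- what changed: Replaced A's break-out accumulator loop over range(idx+1, len(data)) by a pipeline: slice the tail once, build a prefix-sum array in one pass, locate the cutoff by binary search over the monotone prefix sums, and return one take of the tail.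
-- intended difference: For nonempty data with -len(data) <= idx+1 < 0 and thr at least the total length of the wrapped tail plus the first element's length, A's range loop wraps around and re-collects items from the start of the list (returning duplicates, e.g. [(2,[8]),(1,[7]),(2,[8])] at the witness); B returns only the qualifying items of the trailing slice data[idx+1:] ([(2,[8])]), which is the intended 'items after position idx' behaviour. — e.g. on forward_sample([(1, [7]), (2, [8])], -2, 10): A returns [(2, [8]), (1, [7]), (2, [8])], B returns [(2, [8])]
import Mathlib
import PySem

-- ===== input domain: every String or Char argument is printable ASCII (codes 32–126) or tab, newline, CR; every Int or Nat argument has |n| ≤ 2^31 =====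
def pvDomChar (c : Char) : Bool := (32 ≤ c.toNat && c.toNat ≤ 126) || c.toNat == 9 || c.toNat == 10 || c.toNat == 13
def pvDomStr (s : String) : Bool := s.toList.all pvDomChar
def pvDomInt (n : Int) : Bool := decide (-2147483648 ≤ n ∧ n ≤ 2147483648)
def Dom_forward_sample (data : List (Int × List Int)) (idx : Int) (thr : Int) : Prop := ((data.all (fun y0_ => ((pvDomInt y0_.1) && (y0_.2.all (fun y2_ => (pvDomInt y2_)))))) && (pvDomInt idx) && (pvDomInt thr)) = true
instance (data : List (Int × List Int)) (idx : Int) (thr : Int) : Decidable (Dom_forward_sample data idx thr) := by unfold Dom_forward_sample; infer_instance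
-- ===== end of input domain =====

-- B replaces A's break-out accumulator loop by slice + prefix-sum array + binary search for
-- the cutoff (an 'alternative' decomposition, not claimed faster); equal return values on Pre_
-- outside D_ (A's negative-idx wrap-around corner, where B's slice behaviour is the intended one).

-- ===== PORT A =====
-- the for/break loop of A: state = (remaining indices, count, samples)
def goA (data : List (Int × List Int)) (thr : Int) : List Int → Int → List (Int × List Int) → List (Int × List Int)
  | [], _, samples => samples
  | i :: rest, count, samples =>
    match PySem.List.pyGet? data i with
    | none => samples   -- IndexError in Python; unreachable under Pre_
    | some x =>
      if count + (x.2.length : Int) ≤ thr then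
        goA data thr rest (count + (x.2.length : Int)) (samples ++ [x])
      else samples

def forward_sample (data : List (Int × List Int)) (idx : Int) (thr : Int) : List (Int × List Int) :=
  goA data thr (PySem.List.pyRange (idx + 1) (data.length : Int) 1) 0 []

-- ===== PORT B =====
-- the prefix-sum array built by B's enumerate loop (filled in order j = 0,1,…)
def psumsB (run : Int) : List (Int × List Int) → List Int
  | [] => []
  | x :: xs => (run + (x.2.length : Int)) :: psumsB (run + (x.2.length : Int)) xs

-- B's while-loop binary search: first position whose prefix sum exceeds thr
def bsearchB (pfx : List Int) (thr : Int) (lo hi : Nat) : Nat :=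
  if _h : lo < hi then
    if pfx.getD ((lo + hi) / 2) 0 ≤ thr then bsearchB pfx thr ((lo + hi) / 2 + 1) hi
    else bsearchB pfx thr lo ((lo + hi) / 2)
  else lo
termination_by hi - lo
decreasing_by all_goals omega

def forward_sample_alt (data : List (Int × List Int)) (idx : Int) (thr : Int) : List (Int × List Int) :=
  let tail := PySem.List.slice data (some (idx + 1)) none
  let pfx := psumsB 0 tail
  tail.take (bsearchB pfx thr 0 tail.length)

-- ===== PRECONDITION & SPEC =====
-- Pre_ excludes exactly the inputs where A raises IndexError: idx+1 < -len(data)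
-- (the first wrapped access data[idx+1] is out of range).
def Pre_forward_sample (data : List (Int × List Int)) (idx : Int) (thr : Int) : Prop :=
  -(data.length : Int) ≤ idx + 1
instance (data : List (Int × List Int)) (idx : Int) (thr : Int) : Decidable (Pre_forward_sample data idx thr) := by unfold Pre_forward_sample; infer_instance

def pvWitness_forward_sample : (List (Int × List Int)) × Int × Int := ([(1, [2]), (3, [4, 5])], 0, 5)


-- On -len(data) ≤ idx+1 < 0 (nonempty data) with thr at least the wrapped tail's total length
-- plus the first element's length, A's range loop wraps around and re-collects items from the
-- START of the list (duplicating items); B returns only the qualifying items of the trailing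
-- slice data[idx+1:], which is the intended 'items after position idx' behaviour.
def D_forward_sample (data : List (Int × List Int)) (idx : Int) (thr : Int) : Prop :=
  idx < -1 ∧ idx.natAbs - 1 ≤ data.length ∧
    (((data.drop (data.length - (idx.natAbs - 1)) ++ data.take 1).map (·.2.length)).sum : Int) ≤ thr
instance (data : List (Int × List Int)) (idx : Int) (thr : Int) : Decidable (D_forward_sample data idx thr) := by unfold D_forward_sample; infer_instance

def Spec_forward_sample (data : List (Int × List Int)) (idx : Int) (thr : Int) (out : List (Int × List Int)) : Prop := ¬ D_forward_sample data idx thr → out = forward_sample_alt data idx thr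
instance (data : List (Int × List Int)) (idx : Int) (thr : Int) (out : List (Int × List Int)) : Decidable (Spec_forward_sample data idx thr out) := by unfold Spec_forward_sample; infer_instance

def pvDiffWitness_forward_sample : (List (Int × List Int)) × Int × Int := ([(1, [7]), (2, [8])], -2, 10)
def pvDiffWitnessOut_forward_sample : (List (Int × List Int)) × (List (Int × List Int)) :=
  ([(2, [8]), (1, [7]), (2, [8])], [(2, [8])])

-- ===== CLAIM =====
def Claim_unchanged_forward_sample : Prop := ∀ (data : List (Int × List Int)) (idx : Int) (thr : Int), Dom_forward_sample data idx thr → Pre_forward_sample data idx thr → Spec_forward_sample data idx thr (forward_sample data idx thr)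
def Claim_changed_forward_sample : Prop := Dom_forward_sample (pvDiffWitness_forward_sample.1) (pvDiffWitness_forward_sample.2.1) (pvDiffWitness_forward_sample.2.2) ∧ Pre_forward_sample (pvDiffWitness_forward_sample.1) (pvDiffWitness_forward_sample.2.1) (pvDiffWitness_forward_sample.2.2) ∧ D_forward_sample (pvDiffWitness_forward_sample.1) (pvDiffWitness_forward_sample.2.1) (pvDiffWitness_forward_sample.2.2) ∧ forward_sample (pvDiffWitness_forward_sample.1) (pvDiffWitness_forward_sample.2.1) (pvDiffWitness_forward_sample.2.2) = pvDiffWitnessOut_forward_sample.1 ∧ forward_sample_alt (pvDiffWitness_forward_sample.1) (pvDiffWitness_forward_sample.2.1) (pvDiffWitness_forward_sample.2.2) = pvDiffWitnessOut_forward_sample.2 ∧ pvDiffWitnessOut_forward_sample.1 ≠ pvDiffWitnessOut_forward_sample.2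
def Claim_exact_forward_sample : Prop := ∀ (data : List (Int × List Int)) (idx : Int) (thr : Int), Dom_forward_sample data idx thr → Pre_forward_sample data idx thr → D_forward_sample data idx thr → forward_sample data idx thr ≠ forward_sample_alt data idx thr

-- ===== LEMMAS AND PROOFS =====

def sumLen (u : List (Int × List Int)) : Int := (u.map (fun x => (x.2.length : Int))).sum

-- the common functional core: longest prefix whose cumulative length stays ≤ thr
def cumTake (thr : Int) : List (Int × List Int) → List (Int × List Int)
  | [] => []
  | x :: xs => if (x.2.length : Int) ≤ thr then x :: cumTake (thr - (x.2.length : Int)) xs else []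

theorem sumLen_nonneg (u : List (Int × List Int)) : 0 ≤ sumLen u := by
  induction u with
  | nil => simp [sumLen]
  | cons x xs ih => simp only [sumLen, List.map_cons, List.sum_cons] at *; omega

theorem cumTake_neg (thr : Int) (u : List (Int × List Int)) (h : thr < 0) : cumTake thr u = [] := by
  cases u with
  | nil => rfl
  | cons x xs => simp only [cumTake]; rw [if_neg (by omega)]

theorem cumTake_all (thr : Int) (u : List (Int × List Int)) (h : sumLen u ≤ thr) : cumTake thr u = u := by
  induction u generalizing thr with
  | nil => rfl
  | cons x xs ih =>
    simp only [sumLen, List.map_cons, List.sum_cons] at h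
    have hx : 0 ≤ sumLen xs := sumLen_nonneg xs
    simp only [cumTake]
    rw [if_pos (by simp only [sumLen] at hx; omega)]
    rw [ih (thr - (x.2.length : Int)) (by simp only [sumLen] at *; omega)]

theorem cumTake_length_le (thr : Int) (u : List (Int × List Int)) : (cumTake thr u).length ≤ u.length := by
  induction u generalizing thr with
  | nil => simp [cumTake]
  | cons x xs ih =>
    simp only [cumTake]
    split
    · simpa using Nat.succ_le_succ (ih _)
    · simp

theorem cumTake_append (thr : Int) (u v : List (Int × List Int)) :
    cumTake thr (u ++ v) = if sumLen u ≤ thr then u ++ cumTake (thr - sumLen u) v else cumTake thr u := by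
  induction u generalizing thr with
  | nil =>
    have hs0 : sumLen ([] : List (Int × List Int)) = 0 := rfl
    by_cases h : (0:Int) ≤ thr
    · rw [List.nil_append, hs0, if_pos h, List.nil_append, sub_zero]
    · rw [List.nil_append, hs0, if_neg h, cumTake_neg thr v (by omega)]
      rfl
  | cons x xs ih =>
    have hx : 0 ≤ sumLen xs := sumLen_nonneg xs
    have hsum : sumLen (x :: xs) = (x.2.length : Int) + sumLen xs := by
      simp [sumLen]
    simp only [List.cons_append, cumTake]
    by_cases hxt : (x.2.length : Int) ≤ thr
    · rw [if_pos hxt, if_pos hxt, ih (thr - (x.2.length : Int))]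
      rw [hsum]
      by_cases hrest : sumLen xs ≤ thr - (x.2.length : Int)
      · rw [if_pos hrest, if_pos (by omega)]
        rw [show thr - (x.2.length : Int) - sumLen xs = thr - ((x.2.length : Int) + sumLen xs) from by omega]
      · rw [if_neg hrest, if_neg (by omega)]
    · rw [if_neg hxt, if_neg hxt, if_neg (by rw [hsum]; omega)]

-- ===== A's loop equals cumTake over the traversed elements =====
theorem goA_elems (data : List (Int × List Int)) (thr : Int) :
    ∀ (idxs : List Int) (elems : List (Int × List Int)) (c : Int) (acc : List (Int × List Int)),
      idxs.map (PySem.List.pyGet? data) = elems.map some →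
      goA data thr idxs c acc = acc ++ cumTake (thr - c) elems := by
  intro idxs
  induction idxs with
  | nil =>
    intro elems c acc h
    cases elems with
    | nil => simp [goA, cumTake]
    | cons e es => simp at h
  | cons i rest ih =>
    intro elems c acc h
    cases elems with
    | nil => simp at h
    | cons e es =>
      simp only [List.map_cons, List.cons.injEq] at h
      obtain ⟨h1, h2⟩ := h
      simp only [goA, h1]
      by_cases hc : c + (e.2.length : Int) ≤ thr
      · rw [if_pos hc, ih es (c + (e.2.length : Int)) (acc ++ [e]) h2]
        simp only [cumTake]
        rw [if_pos (by omega)]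
        have : thr - (c + (e.2.length : Int)) = thr - c - (e.2.length : Int) := by omega
        simp [this]
      · rw [if_neg hc]
        simp only [cumTake]
        rw [if_neg (by omega)]
        simp

theorem range_map_nonneg (data : List (Int × List Int)) :
    ∀ (k : Nat) (a : Int), 0 ≤ a → (data.length : Int) - a ≤ (k : Int) →
      (PySem.List.pyRange a (data.length : Int) 1).map (PySem.List.pyGet? data) =
        (data.drop a.toNat).map some := by
  intro k
  induction k with
  | zero =>
    intro a ha hk
    rw [PySem.List.pyRange_one_eq_nil (by omega)]
    rw [List.drop_eq_nil_of_le (by omega)]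
    simp
  | succ k ih =>
    intro a ha hk
    by_cases hab : a < (data.length : Int)
    · rw [PySem.List.pyRange_one_cons hab]
      have hlt : a.toNat < data.length := by omega
      rw [List.drop_eq_getElem_cons hlt]
      simp only [List.map_cons]
      rw [PySem.List.pyGet?_of_nonneg data ha, List.getElem?_eq_getElem (by omega : a.toNat < data.length)]
      have hih := ih (a + 1) (by omega) (by omega)
      rw [show (a + 1).toNat = a.toNat + 1 from by omega] at hih
      rw [hih]
    · rw [PySem.List.pyRange_one_eq_nil (by omega)]
      rw [List.drop_eq_nil_of_le (by omega)]
      simp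

theorem range_map_neg (data : List (Int × List Int)) :
    ∀ (k : Nat) (a : Int), -(data.length : Int) ≤ a → a ≤ 0 → -a ≤ (k : Int) →
      (PySem.List.pyRange a 0 1).map (PySem.List.pyGet? data) =
        (data.drop ((data.length : Int) + a).toNat).map some := by
  intro k
  induction k with
  | zero =>
    intro a h1 h2 h3
    have : a = 0 := by omega
    subst this
    rw [PySem.List.pyRange_one_eq_nil (by omega)]
    rw [List.drop_eq_nil_of_le (by omega)]
    simp
  | succ k ih
  => intro a h1 h2 h3
     by_cases ha0 : a = 0
     · subst ha0
       rw [PySem.List.pyRange_one_eq_nil (by omega)]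
       rw [List.drop_eq_nil_of_le (by omega)]
       simp
     · have hneg : a < 0 := by omega
       rw [PySem.List.pyRange_one_cons (by omega)]
       have hlen0 : 0 < data.length := by omega
       have hget : PySem.List.pyGet? data a = data[((data.length : Int) + a).toNat]? := by
         have hk' : 0 < (-a).toNat := by omega
         have hk'' : (-a).toNat ≤ data.length := by omega
         have ha' : a = -(((-a).toNat : Int)) := by omega
         rw [ha', PySem.List.pyGet?_neg_natCast data ((-a).toNat) hk' hk'']
         congr 1
         omega
       have hlt : ((data.length : Int) + a).toNat < data.length := by omega
       rw [List.drop_eq_getElem_cons hlt]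
       simp only [List.map_cons]
       rw [hget, List.getElem?_eq_getElem hlt]
       have hih := ih (a + 1) (by omega) (by omega) (by omega)
       rw [show ((data.length : Int) + (a + 1)).toNat = ((data.length : Int) + a).toNat + 1 from by omega] at hih
       rw [hih]

-- A under Pre_: cumTake over the wrapped traversal sequence
theorem A_char (data : List (Int × List Int)) (idx thr : Int)
    (hpre : -(data.length : Int) ≤ idx + 1) :
    forward_sample data idx thr =
      cumTake thr (if idx + 1 < 0
        then data.drop ((data.length : Int) + (idx + 1)).toNat ++ data
        else data.drop (idx + 1).toNat) := by
  unfold forward_sample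
  by_cases hs : idx + 1 < 0
  · rw [if_pos hs]
    have hmap : (PySem.List.pyRange (idx + 1) (data.length : Int) 1).map (PySem.List.pyGet? data) =
        (data.drop ((data.length : Int) + (idx + 1)).toNat ++ data).map some := by
      rw [PySem.List.pyRange_one_append (idx + 1) 0 (data.length : Int) (by omega) (by omega)]
      rw [List.map_append, List.map_append]
      rw [range_map_neg data (-(idx+1)).toNat (idx + 1) hpre (by omega) (by omega)]
      have h0 := range_map_nonneg data data.length 0 (by omega) (by omega)
      simp only [Int.toNat_zero, List.drop_zero] at h0
      rw [h0]
    rw [goA_elems data thr _ _ 0 [] hmap]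
    simp
  · rw [if_neg hs]
    have hmap := range_map_nonneg data data.length (idx + 1) (by omega) (by omega)
    rw [goA_elems data thr _ _ 0 [] hmap]
    simp

-- ===== B's pipeline equals cumTake over the slice =====
theorem psumsB_length (run : Int) (xs : List (Int × List Int)) : (psumsB run xs).length = xs.length := by
  induction xs generalizing run with
  | nil => rfl
  | cons x xs ih => simp [psumsB, ih]

def cutoff (thr : Int) : List Int → Nat
  | [] => 0
  | v :: vs => if v ≤ thr then cutoff thr vs + 1 else 0

theorem cutoff_le_length (thr : Int) (l : List Int) : cutoff thr l ≤ l.length := by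
  induction l with
  | nil => simp [cutoff]
  | cons v vs ih => simp only [cutoff]; split <;> simp <;> omega

theorem getElem_lt_cutoff (thr : Int) :
    ∀ (l : List Int) (i : Nat) (h : i < l.length), i < cutoff thr l → l[i] ≤ thr := by
  intro l
  induction l with
  | nil => intro i h; simp at h
  | cons v vs ih =>
    intro i h hi
    simp only [cutoff] at hi
    by_cases hv : v ≤ thr
    · rw [if_pos hv] at hi
      cases i with
      | zero => simpa using hv
      | succ j => simpa using ih j (by simpa using h) (by omega)
    · rw [if_neg hv] at hi; omega

theorem getElem_cutoff (thr : Int) :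
    ∀ (l : List Int) (h : cutoff thr l < l.length), ¬ l[cutoff thr l] ≤ thr := by
  intro l
  induction l with
  | nil => intro h; simp at h
  | cons v vs ih =>
    intro h
    by_cases hv : v ≤ thr
    · have hc : cutoff thr (v :: vs) = cutoff thr vs + 1 := by simp [cutoff, hv]
      have h' : cutoff thr vs < vs.length := by
        have := h; rw [hc] at this; simpa using this
      simp only [hc, List.getElem_cons_succ]
      exact ih h'
    · have hc : cutoff thr (v :: vs) = 0 := by simp [cutoff, hv]
      simp only [hc, List.getElem_cons_zero]
      exact hv

theorem psumsB_ge (run : Int) (xs : List (Int × List Int)) :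
    ∀ v ∈ psumsB run xs, run ≤ v := by
  induction xs generalizing run with
  | nil => simp [psumsB]
  | cons x xs ih =>
    intro v hv
    simp only [psumsB, List.mem_cons] at hv
    rcases hv with h | h
    · subst h; omega
    · have h1 := ih (run + (x.2.length : Int)) v h
      omega

theorem psumsB_pairwise (run : Int) (xs : List (Int × List Int)) :
    (psumsB run xs).Pairwise (· ≤ ·) := by
  induction xs generalizing run with
  | nil => simp [psumsB]
  | cons x xs ih =>
    simp only [psumsB, List.pairwise_cons]
    exact ⟨fun v hv => psumsB_ge _ _ v hv, ih _⟩

theorem bsearchB_eq (pfx : List Int) (thr : Int) (hmono : pfx.Pairwise (· ≤ ·)) :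
    ∀ (k lo hi : Nat), hi - lo ≤ k → lo ≤ cutoff thr pfx → cutoff thr pfx ≤ hi →
      hi ≤ pfx.length → bsearchB pfx thr lo hi = cutoff thr pfx := by
  have hm : ∀ (i j : Nat) (h1 : i < pfx.length) (h2 : j < pfx.length), i ≤ j → pfx[i] ≤ pfx[j] := by
    intro i j h1 h2 hij
    rcases Nat.lt_or_ge i j with h | h
    · exact List.pairwise_iff_getElem.mp hmono i j h1 h2 h
    · have : i = j := by omega
      subst this; exact le_refl _
  intro k
  induction k with
  | zero =>
    intro lo hi hk h1 h2 h3
    rw [bsearchB]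
    rw [dif_neg (by omega)]
    omega
  | succ k ih =>
    intro lo hi hk h1 h2 h3
    rw [bsearchB]
    by_cases hlh : lo < hi
    · rw [dif_pos hlh]
      have hmid : (lo + hi) / 2 < pfx.length := by omega
      rw [List.getD_eq_getElem pfx 0 hmid]
      by_cases hle : pfx[(lo + hi) / 2] ≤ thr
      · rw [if_pos hle]
        have hcut : (lo + hi) / 2 < cutoff thr pfx := by
          by_contra hc
          have ht : cutoff thr pfx < pfx.length := by omega
          have := getElem_cutoff thr pfx ht
          have := hm (cutoff thr pfx) ((lo + hi) / 2) ht hmid (by omega)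
          omega
        exact ih ((lo + hi) / 2 + 1) hi (by omega) (by omega) h2 h3
      · rw [if_neg hle]
        have hcut : cutoff thr pfx ≤ (lo + hi) / 2 := by
          by_contra hc
          exact hle (getElem_lt_cutoff thr pfx ((lo + hi) / 2) hmid (by omega))
        exact ih lo ((lo + hi) / 2) (by omega) h1 hcut (by omega)
    · rw [dif_neg hlh]
      omega

theorem take_cutoff_psums :
    ∀ (xs : List (Int × List Int)) (run thr : Int),
      xs.take (cutoff thr (psumsB run xs)) = cumTake (thr - run) xs := by
  intro xs
  induction xs with
  | nil => intro run thr; rfl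
  | cons x xs ih =>
    intro run thr
    simp only [psumsB, cutoff, cumTake]
    by_cases h : run + (x.2.length : Int) ≤ thr
    · rw [if_pos h, if_pos (by omega)]
      rw [List.take_succ_cons, ih (run + (x.2.length : Int)) thr]
      congr 2
      omega
    · rw [if_neg h, if_neg (by omega)]
      simp

theorem B_char (data : List (Int × List Int)) (idx thr : Int) :
    forward_sample_alt data idx thr =
      cumTake thr (data.drop (PySem.List.clampIdx data.length (idx + 1))) := by
  simp only [forward_sample_alt]
  rw [PySem.List.slice_some_none]
  set tail := data.drop (PySem.List.clampIdx data.length (idx + 1)) with htail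
  rw [bsearchB_eq (psumsB 0 tail) thr (psumsB_pairwise 0 tail) tail.length 0 tail.length
      (by omega)
      (by omega)
      (by rw [← psumsB_length 0 tail]; exact cutoff_le_length thr _)
      (by rw [psumsB_length])]
  have := take_cutoff_psums tail 0 thr
  simpa using this

theorem clampIdx_nonneg_drop (data : List (Int × List Int)) (s : Int) (hs : 0 ≤ s) :
    data.drop (PySem.List.clampIdx data.length s) = data.drop s.toNat := by
  have h1 : s = ((s.toNat : Nat) : Int) := by omega
  rw [h1, PySem.List.clampIdx_natCast, Int.toNat_natCast]
  rcases le_total s.toNat data.length with h | h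
  · rw [Nat.min_eq_left h]
  · rw [Nat.min_eq_right h, List.drop_eq_nil_of_le h, List.drop_eq_nil_of_le (le_refl _)]

theorem clampIdx_neg_eq (data : List (Int × List Int)) (s : Int) (h1 : -(data.length : Int) ≤ s)
    (h2 : s < 0) : PySem.List.clampIdx data.length s = ((data.length : Int) + s).toNat := by
  have hk : 0 < (-s).toNat := by omega
  have hs' : s = -(((-s).toNat : Nat) : Int) := by omega
  rw [hs', PySem.List.clampIdx_neg_natCast _ _ hk]
  omega

-- the sum in D_ splits into the wrapped tail's total plus the first element's length
theorem sumLen_append (u v : List (Int × List Int)) : sumLen (u ++ v) = sumLen u + sumLen v := by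
  simp [sumLen]

theorem D_index_eq (data : List (Int × List Int)) (idx : Int) (h1 : idx < -1)
    (h2 : idx.natAbs - 1 ≤ data.length) :
    data.length - (idx.natAbs - 1) = ((data.length : Int) + (idx + 1)).toNat := by
  omega

-- the two sides inside D_: A = tail ++ (nonempty head part), B = tail
theorem A_in_D (data : List (Int × List Int)) (idx thr : Int)
    (hd : D_forward_sample data idx thr) :
    forward_sample data idx thr =
      data.drop ((data.length : Int) + (idx + 1)).toNat ++
        cumTake (thr - sumLen (data.drop ((data.length : Int) + (idx + 1)).toNat)) data := by
  obtain ⟨hs, hpre2, hsum'⟩ := hd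
  have hpre : -(data.length : Int) ≤ idx + 1 := by omega
  have hsum : sumLen (data.drop (data.length - (idx.natAbs - 1)) ++ data.take 1) ≤ thr := hsum'
  rw [D_index_eq data idx hs hpre2, sumLen_append] at hsum
  rw [A_char data idx thr hpre, if_pos (by omega : idx + 1 < 0)]
  rw [cumTake_append]
  have h0 : 0 ≤ sumLen (data.take 1) := sumLen_nonneg _
  rw [if_pos (by omega)]

-- ===== VERDICT =====
theorem forward_sample_spec : Claim_unchanged_forward_sample := by
  intro data idx thr hdom hpre hnd
  rw [B_char data idx thr]
  unfold Pre_forward_sample at hpre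
  by_cases hs : idx + 1 < 0
  · -- negative start: A wraps, but ¬D_ means the wrap contributes nothing
    rw [clampIdx_neg_eq data (idx + 1) hpre hs]
    set u := data.drop ((data.length : Int) + (idx + 1)).toNat with hu
    rw [A_char data idx thr hpre, if_pos hs, cumTake_append]
    have hsum : ¬ (sumLen u + sumLen (data.take 1) ≤ thr) := by
      intro hle
      refine hnd ⟨by omega, by omega, ?_⟩
      show sumLen (data.drop (data.length - (idx.natAbs - 1)) ++ data.take 1) ≤ thr
      rw [D_index_eq data idx (by omega) (by omega), sumLen_append]
      exact hle
    by_cases hU : sumLen u ≤ thr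
    · rw [if_pos hU]
      have hnil : cumTake (thr - sumLen u) data = [] := by
        cases data with
        | nil => rfl
        | cons d0 rest =>
          have h1 : sumLen ((d0 :: rest).take 1) = (d0.2.length : Int) := by simp [sumLen]
          simp only [cumTake]
          rw [if_neg (by rw [h1] at hsum; omega)]
      rw [hnil, List.append_nil, cumTake_all thr u hU]
    · rw [if_neg hU]
  · rw [A_char data idx thr hpre, if_neg hs]
    rw [clampIdx_nonneg_drop data (idx + 1) (by omega)]

theorem forward_sample_changed : Claim_changed_forward_sample := by
  unfold Claim_changed_forward_sample
  refine ⟨by decide, by decide, by decide, by decide, ?_, by decide⟩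
  rw [B_char]
  decide

theorem forward_sample_tight : Claim_exact_forward_sample := by
  intro data idx thr hdom hpre hD heq
  obtain ⟨hs, hpre2, hsum'⟩ := hD
  have hsum : sumLen (data.drop (data.length - (idx.natAbs - 1)) ++ data.take 1) ≤ thr := hsum'
  rw [D_index_eq data idx hs hpre2, sumLen_append] at hsum
  rw [A_in_D data idx thr ⟨hs, hpre2, hsum'⟩] at heq
  rw [B_char data idx thr, clampIdx_neg_eq data (idx + 1) (by omega) (by omega)] at heq
  set u := data.drop ((data.length : Int) + (idx + 1)).toNat with hu
  have hlenA : (u ++ cumTake (thr - sumLen u) data).length = u.length + (cumTake (thr - sumLen u) data).length := by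
    simp
  have hnonempty : (cumTake (thr - sumLen u) data).length ≠ 0 := by
    cases data with
    | nil => simp at hpre2; omega
    | cons d0 rest =>
      have h1 : sumLen ((d0 :: rest).take 1) = (d0.2.length : Int) := by simp [sumLen]
      simp only [cumTake] at *
      rw [if_pos (by rw [h1] at hsum; omega)]
      simp
  have hB : (cumTake thr u).length ≤ u.length := cumTake_length_le thr u
  have hlen := congrArg List.length heq
  rw [hlenA] at hlen
  omega
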